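-- pv_equiv track=rewrite | github.com/Eugene-Arefyev/lesson2_3 | solution.py | get_words_longer
-- ===== SOURCE A (Python) =====
-- def get_words_longer(text, word_len):
--     res = {}
--
--     for word in text.replace("\n", "").split():
--         if len(word) > word_len:
--             if word in res:
--                 res[word] += 1
--             else:
--                 res[word] = 1
--
--     return res
-- ===== SOURCE B (Python) =====
-- def get_words_longer(text, word_len):
--     words = [w for w in text.replace("\n", "").split() if len(w) > word_len]
--     pairs = []
--     while words:
--         w = words[0]
--         rest = [x for x in words if x != w]
--         pairs.append((w, len(words) - len(rest)))
--         words = rest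
--     return dict(pairs)
-- ===== Notes on version B (the rewrite author's own statement) =====
-- stated objective: alternative
-- what changed: Replaces A's single-pass incremental dict counting by an extract-and-remove grouping: repeatedly take the first remaining word, compute its total count as the length drop after removing all its occurrences, emit one (word, count) pair, and recurse on the remainder; the pairs are turned into a dict at the end.
import Mathlib
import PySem

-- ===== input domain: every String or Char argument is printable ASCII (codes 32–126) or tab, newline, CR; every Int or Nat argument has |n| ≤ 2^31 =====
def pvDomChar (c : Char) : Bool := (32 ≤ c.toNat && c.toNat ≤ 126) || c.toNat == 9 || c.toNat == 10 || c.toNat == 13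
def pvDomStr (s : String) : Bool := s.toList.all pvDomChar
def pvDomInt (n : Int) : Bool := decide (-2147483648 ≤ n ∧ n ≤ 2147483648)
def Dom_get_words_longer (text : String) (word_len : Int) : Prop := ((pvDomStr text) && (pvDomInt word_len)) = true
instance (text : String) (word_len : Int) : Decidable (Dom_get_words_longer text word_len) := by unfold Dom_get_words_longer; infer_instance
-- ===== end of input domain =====

-- B replaces A's incremental dict-update scan by extract-and-remove grouping: take the first
-- remaining long word, count it via the length drop after removing all its occurrences, and
-- continue on the remainder; same results, a genuinely different counting strategy (not faster).

-- ===== PORT A =====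
-- for word in text.replace("\n","").split(): if len(word) > word_len: if word in res: res[word] += 1 else: res[word] = 1
def get_words_longer (text : String) (word_len : Int) : List (String × Int) :=
  ((PySem.Str.split₀ (PySem.Str.replace text "\n" "")).foldl
    (fun res word =>
      if PySem.Str.len word > word_len then
        if res.contains word then res.insert word (res.getD word 0 + 1)
        else res.insert word 1
      else res)
    PySem.Dict.empty).items

-- ===== PORT B =====
-- the while loop: w = words[0]; rest = [x for x in words if x != w]; pairs.append((w, len(words)-len(rest))); words = rest
def pvGroupB : List String → List (String × Int)
  | [] => []
  | w :: t =>
    (w, ((w :: t).length : Int) - (((w :: t).filter (fun x => x != w)).length : Int))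
      :: pvGroupB ((w :: t).filter (fun x => x != w))
termination_by ws => ws.length
decreasing_by
  simp only [List.filter_cons, bne_self_eq_false, List.length_cons]
  exact Nat.lt_succ_of_le (List.length_filter_le _ _)

-- words = [w for w in text.replace("\n","").split() if len(w) > word_len]; return dict(pairs)
def get_words_longer_alt (text : String) (word_len : Int) : List (String × Int) :=
  let words := (PySem.Str.split₀ (PySem.Str.replace text "\n" "")).filter
      (fun w => decide (PySem.Str.len w > word_len))
  (PySem.Dict.ofList (pvGroupB words)).items

-- ===== PRECONDITION & SPEC =====
def Spec_get_words_longer (text : String) (word_len : Int) (out : List (String × Int)) : Prop := out = get_words_longer_alt text word_len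
instance (text : String) (word_len : Int) (out : List (String × Int)) : Decidable (Spec_get_words_longer text word_len out) := by unfold Spec_get_words_longer; infer_instance

-- ===== CLAIM (what is proved, stated in full; the proofs are below) =====
def Claim_equal_get_words_longer : Prop := ∀ (text : String) (word_len : Int), Dom_get_words_longer text word_len → Spec_get_words_longer text word_len (get_words_longer text word_len)

-- ===== LEMMAS AND PROOFS =====

-- A's loop body, with the contains-branch collapsed (getD is 0 on a missing key).
theorem astep_eq (word_len : Int) :
    (fun (res : PySem.Dict String Int) word =>
        if PySem.Str.len word > word_len then
          if res.contains word then res.insert word (res.getD word 0 + 1)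
          else res.insert word 1
        else res)
      = (fun res word =>
          if PySem.Str.len word > word_len then res.insert word (res.getD word 0 + 1)
          else res) := by
  funext res word
  by_cases hl : PySem.Str.len word > word_len
  · rw [if_pos hl, if_pos hl]
    by_cases hc : res.contains word = true
    · rw [if_pos hc]
    · rw [if_neg hc, PySem.Dict.getD_of_not_contains _ _ (Bool.eq_false_iff.mpr hc), zero_add]
  · rw [if_neg hl, if_neg hl]

-- set(filter) is filter(set): first occurrences survive filtering in the same order.
theorem ofList_filter (p : String → Bool) (t : List String) :
    PySem.Set.ofList (t.filter p) = (PySem.Set.ofList t).filter p := by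
  induction t with
  | nil => rfl
  | cons w t ih =>
    cases hp : p w with
    | false =>
      rw [List.filter_cons_of_neg (by simp [hp]), PySem.Set.ofList_cons, ih,
        List.filter_cons_of_neg (by simp [hp]), PySem.Set.discard, List.filter_filter]
      apply List.filter_congr
      intro x _
      cases hx : p x with
      | false => simp
      | true =>
        have hxw : x ≠ w := by rintro rfl; rw [hp] at hx; exact Bool.false_ne_true hx
        simp [hxw]
    | true =>
      rw [List.filter_cons_of_pos (by simp [hp]), PySem.Set.ofList_cons, PySem.Set.ofList_cons,
        ih, List.filter_cons_of_pos (by simp [hp]), PySem.Set.discard, PySem.Set.discard,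
        List.filter_filter, List.filter_filter]
      exact congrArg (List.cons w) (List.filter_congr (fun x _ => Bool.and_comm _ _))

-- count of a word = total length minus length after removing all its occurrences.
theorem count_add_filter_length (w : String) (l : List String) :
    l.count w + (l.filter (fun x => x != w)).length = l.length := by
  induction l with
  | nil => rfl
  | cons x l ih =>
    by_cases hx : x = w
    · subst hx
      rw [List.count_cons_self, List.filter_cons_of_neg (by simp), List.length_cons]
      omega
    · have hb : (x == w) = false := by simp [hx]
      rw [List.count_cons, hb, List.filter_cons_of_pos (by simp [hx]), List.length_cons,
        List.length_cons]
      simp only [Bool.false_eq_true, if_false]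
      omega

-- the extract-and-remove grouping lists each distinct word (first occurrence order) with its count.
theorem groupB_eq (ws : List String) :
    pvGroupB ws = (PySem.Set.ofList ws).map (fun k => (k, (ws.count k : Int))) := by
  induction ws using pvGroupB.induct with
  | case1 => simp [pvGroupB]
  | case2 w t ih =>
    have hrest : (w :: t).filter (fun x => x != w) = t.filter (fun x => x != w) :=
      List.filter_cons_of_neg (by simp)
    rw [pvGroupB]
    rw [hrest] at ih ⊢
    rw [ih, PySem.Set.ofList_cons, List.map_cons, ofList_filter]
    refine List.cons_eq_cons.mpr ⟨?_, ?_⟩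
    · have h := count_add_filter_length w (w :: t)
      rw [hrest] at h
      simp only [Prod.mk.injEq, true_and]
      omega
    · rw [PySem.Set.discard]
      apply List.map_congr_left
      intro k hk
      have hkb : (k != w) = true := by
        have := (List.mem_filter.mp hk).2
        simpa [bne] using this
      have hkw : k ≠ w := by simpa using hkb
      have hwk : (w == k) = false := by simp [Ne.symm hkw]
      have hkb' : (fun x => x != w) k = true := hkb
      rw [List.count_filter (p := fun x => x != w) hkb', List.count_cons, hwk]
      simp

-- dict(pairs) with pairwise-distinct keys: items are exactly the pairs.
theorem items_ofList_pairs (pairs : List (String × Int)) (h : (pairs.map Prod.fst).Nodup) :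
    (PySem.Dict.ofList pairs).items = pairs := by
  have hfresh : ∀ a ∈ pairs, (PySem.Dict.empty : PySem.Dict String Int).contains a.1 = false :=
    fun a _ => PySem.Dict.contains_empty _
  have hmain := PySem.Dict.items_foldl_insert_fresh pairs Prod.fst Prod.snd PySem.Dict.empty hfresh h
  simpa [PySem.Dict.ofList, PySem.Dict.update] using hmain

-- B's whole pipeline, characterised the same way as A's Counter.
theorem bitems (ws : List String) :
    (PySem.Dict.ofList (pvGroupB ws)).items
      = (PySem.Set.ofList ws).map (fun k => (k, (ws.count k : Int))) := by
  have hnd : ((pvGroupB ws).map Prod.fst).Nodup := by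
    rw [groupB_eq, List.map_map]
    have hcomp : (Prod.fst ∘ fun k : String => (k, (ws.count k : Int))) = id := rfl
    rw [hcomp, List.map_id]
    exact PySem.Set.nodup_ofList ws
  rw [items_ofList_pairs _ hnd, groupB_eq]

-- ===== VERDICT (by name: the statement is the Claim_ definition above) =====
set_option maxHeartbeats 1000000 in
theorem get_words_longer_spec : Claim_equal_get_words_longer := by
  intro text word_len _
  show ((PySem.Str.split₀ (PySem.Str.replace text "\n" "")).foldl
      (fun res word =>
        if PySem.Str.len word > word_len then
          if res.contains word then res.insert word (res.getD word 0 + 1)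
          else res.insert word 1
        else res)
      PySem.Dict.empty).items
    = (PySem.Dict.ofList (pvGroupB ((PySem.Str.split₀ (PySem.Str.replace text "\n" "")).filter
        (fun w => decide (PySem.Str.len w > word_len))))).items
  rw [astep_eq, PySem.List.foldl_ite_eq_foldl_filter,
    PySem.Dict.foldl_insert_getD_add_one_eq_counter, PySem.Dict.items_counter, bitems]
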